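-- pv_equiv track=rewrite | github.com/NishantKumar1301/Dsa-Pratice-Questions | Leetcode/Problem Of The Day/September 2025/sept6.py | solve
-- ===== SOURCE A (Python) =====
-- def solve(left,right):
--     """
--     L->R
--     1-3 -> 1 step
--     4-15 -> 2 step
--     16-63 -> 3 step
--     if s tep then range = 4**(s-1) to 4**s-1
--     """
--     L = 1
--     step =1
--     cnt = 0
--     while L<=right:
--         R = 4*L-1
--         start = max(left,L)
--         end = min(right,R)
--         if start<=end:
--             cnt+=(end-start+1)*step
--         L = 4*L
--         step+=1
--     return cnt
-- ===== SOURCE B (Python) =====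
-- def _F(x):
--     # sum of base-4 digit lengths of all integers in [1, x]; 0 for x <= 0
--     if x <= 0:
--         return 0
--     total = 0
--     p = 1
--     k = 1
--     while 4 * p <= x:
--         total += 3 * p * k
--         p *= 4
--         k += 1
--     return total + (x - p + 1) * k
--
-- def solve(left, right):
--     if left > right:
--         return 0
--     return _F(right) - _F(max(left, 1) - 1)
-- ===== Notes on version B (the rewrite author's own statement) =====
-- stated objective: alternative
-- what changed: Replaces A's single loop that intersects each base-4 band with [left,right] by a prefix-sum decomposition: a helper F(x) sums digit-lengths over [1,x] (full bands plus one partial band) and the answer is F(right) - F(max(left,1)-1), with an explicit empty-range guard.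
import Mathlib
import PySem

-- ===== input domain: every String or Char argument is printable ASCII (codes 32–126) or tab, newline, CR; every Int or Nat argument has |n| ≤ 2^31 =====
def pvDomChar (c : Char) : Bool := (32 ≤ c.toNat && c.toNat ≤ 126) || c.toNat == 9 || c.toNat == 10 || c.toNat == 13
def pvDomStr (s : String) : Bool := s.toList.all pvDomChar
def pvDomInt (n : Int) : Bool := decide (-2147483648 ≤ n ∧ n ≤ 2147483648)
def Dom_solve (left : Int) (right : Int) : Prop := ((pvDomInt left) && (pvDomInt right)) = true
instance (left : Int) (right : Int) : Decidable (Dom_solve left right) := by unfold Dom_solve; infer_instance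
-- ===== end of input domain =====

-- B replaces A's single interval-overlap band loop by a prefix-sum decomposition
-- F(right) - F(left-1), where F(x) sums full bands and one partial band (objective: alternative).

-- ===== PORT A =====
-- A's while loop; the 0 < L conjunct only makes the recursion total (L starts at 1 and quadruples).
def solveLoop (left right L step cnt : Int) : Int :=
  if h : 0 < L ∧ L ≤ right then
    -- R = 4*L-1, start = max(left,L), end = min(right,R), inlined
    solveLoop left right (4 * L) (step + 1)
      (if max left L ≤ min right (4 * L - 1) then cnt + (min right (4 * L - 1) - max left L + 1) * step else cnt)
  else cnt
termination_by (right + 1 - L).toNat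
decreasing_by omega

def solve (left : Int) (right : Int) : Int := solveLoop left right 1 1 0

-- ===== PORT B =====
-- B's while loop inside _F; the 0 < p conjunct only makes the recursion total (p starts at 1).
def fLoop (x p k total : Int) : Int :=
  if h : 0 < p ∧ 4 * p ≤ x then fLoop x (4 * p) (k + 1) (total + 3 * p * k)
  else total + (x - p + 1) * k
termination_by (x - p).toNat
decreasing_by omega

def F_alt (x : Int) : Int := if x ≤ 0 then 0 else fLoop x 1 1 0

def solve_alt (left : Int) (right : Int) : Int :=
  if left > right then 0 else F_alt right - F_alt (max left 1 - 1)

-- ===== PRECONDITION & SPEC =====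
def Spec_solve (left : Int) (right : Int) (out : Int) : Prop := out = solve_alt left right
instance (left : Int) (right : Int) (out : Int) : Decidable (Spec_solve left right out) := by unfold Spec_solve; infer_instance

-- ===== CLAIM (what is proved, stated in full; the proofs are below) =====
def Claim_equal_solve : Prop := ∀ (left : Int) (right : Int), Dom_solve left right → Spec_solve left right (solve left right)

-- ===== LEMMAS AND PROOFS =====

-- one-step unfolding equations (conv_lhs so only the head call unfolds)
theorem fLoop_step (x p k t : Int) (h : 0 < p ∧ 4 * p ≤ x) :
    fLoop x p k t = fLoop x (4 * p) (k + 1) (t + 3 * p * k) := by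
  conv_lhs => rw [fLoop, dif_pos h]

theorem fLoop_last (x p k t : Int) (h : ¬ (0 < p ∧ 4 * p ≤ x)) :
    fLoop x p k t = t + (x - p + 1) * k := by
  conv_lhs => rw [fLoop, dif_neg h]

theorem solveLoop_step (left right p k c : Int) (h : 0 < p ∧ p ≤ right) :
    solveLoop left right p k c = solveLoop left right (4 * p) (k + 1)
      (if max left p ≤ min right (4 * p - 1) then c + (min right (4 * p - 1) - max left p + 1) * k else c) := by
  conv_lhs => rw [solveLoop, dif_pos h]

theorem solveLoop_stop (left right p k c : Int) (h : ¬ (0 < p ∧ p ≤ right)) :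
    solveLoop left right p k c = c := by
  conv_lhs => rw [solveLoop, dif_neg h]

-- the accumulator of fLoop is additive
theorem fLoop_shift (x : Int) : ∀ (n : Nat) (p k t : Int), (x - p).toNat = n →
    fLoop x p k t = t + fLoop x p k 0 := by
  intro n
  induction n using Nat.strong_induction_on with
  | _ n ih =>
    intro p k t hn
    by_cases h : 0 < p ∧ 4 * p ≤ x
    · rw [fLoop_step x p k t h, fLoop_step x p k 0 h]
      rw [ih (x - 4*p).toNat (by omega) (4*p) (k+1) (t + 3*p*k) rfl,
          ih (x - 4*p).toNat (by omega) (4*p) (k+1) (0 + 3*p*k) rfl]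
      ring
    · rw [fLoop_last x p k t h, fLoop_last x p k 0 h]; ring

-- when the queried interval is empty, A's loop never adds anything
theorem solveLoop_empty (left right : Int) (hlr : right < left) :
    ∀ (n : Nat) (p k c : Int), (right + 1 - p).toNat = n → solveLoop left right p k c = c := by
  intro n
  induction n using Nat.strong_induction_on with
  | _ n ih =>
    intro p k c hn
    by_cases h : 0 < p ∧ p ≤ right
    · rw [solveLoop_step left right p k c h]
      have hc : ¬ (max left p ≤ min right (4*p-1)) := by
        rcases max_cases left p with ⟨h1, _⟩ | ⟨h1, _⟩ <;>
          rcases min_cases right (4*p-1) with ⟨h2, _⟩ | ⟨h2, _⟩ <;> omega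
      rw [if_neg hc]
      exact ih (right + 1 - 4*p).toNat (by omega) (4*p) (k+1) c rfl
    · exact solveLoop_stop left right p k c h

-- main invariant: A's loop equals the difference of two runs of B's loop
theorem solveLoop_eq_fLoop (left right : Int) (hl : left ≤ right + 1) :
    ∀ (n : Nat) (p k c : Int), (right - p).toNat = n → 0 < p → p ≤ right →
      solveLoop left right p k c =
        c + fLoop right p k 0 - (if p ≤ left - 1 then fLoop (left - 1) p k 0 else 0) := by
  intro n
  induction n using Nat.strong_induction_on with
  | _ n ih =>
    intro p k c hn hp hpr
    rw [solveLoop_step left right p k c ⟨hp, hpr⟩]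
    by_cases h4 : 4 * p ≤ right
    · -- both loops keep going
      have hfr : fLoop right p k 0 = 3*p*k + fLoop right (4*p) (k+1) 0 := by
        rw [fLoop_step right p k 0 ⟨hp, h4⟩,
            fLoop_shift right (right - 4*p).toNat (4*p) (k+1) (0 + 3*p*k) rfl]
        ring
      by_cases hL : left - 1 < p
      · -- whole band [p, 4p-1] is counted; lower prefix is and stays empty
        have hmax : max left p = p := max_eq_right (by omega)
        have hmin : min right (4*p-1) = 4*p-1 := min_eq_right (by omega)
        rw [hmax, hmin, if_pos (by omega : (p:Int) ≤ 4*p-1)]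
        rw [ih (right - 4*p).toNat (by omega) (4*p) (k+1) _ rfl (by omega) (by omega)]
        rw [if_neg (by omega : ¬ (4*p ≤ left - 1)), if_neg (by omega : ¬ (p ≤ left - 1)), hfr]
        ring
      · push_neg at hL
        by_cases hLhi : 4 * p ≤ left - 1
        · -- band entirely below left: contributes 0; both prefix loops advance
          have hc : ¬ (max left p ≤ min right (4*p-1)) := by
            rcases max_cases left p with ⟨h1, _⟩ | ⟨h1, _⟩ <;>
              rcases min_cases right (4*p-1) with ⟨h2, _⟩ | ⟨h2, _⟩ <;> omega
          rw [if_neg hc]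
          rw [ih (right - 4*p).toNat (by omega) (4*p) (k+1) c rfl (by omega) (by omega)]
          have hfl : fLoop (left-1) p k 0 = 3*p*k + fLoop (left-1) (4*p) (k+1) 0 := by
            rw [fLoop_step (left-1) p k 0 ⟨hp, hLhi⟩,
                fLoop_shift (left-1) (left - 1 - 4*p).toNat (4*p) (k+1) (0 + 3*p*k) rfl]
            ring
          rw [if_pos hLhi, if_pos (by omega : p ≤ left - 1), hfl, hfr]
          ring
        · -- p ≤ left-1 < 4p : partial overlap at the bottom band
          push_neg at hLhi
          have hmax : max left p = left := max_eq_left (by omega)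
          have hmin : min right (4*p-1) = 4*p-1 := min_eq_right (by omega)
          have hfl : fLoop (left-1) p k 0 = (left - 1 - p + 1) * k := by
            rw [fLoop_last (left-1) p k 0 (by omega : ¬ (0 < p ∧ 4*p ≤ left - 1))]; ring
          rw [hmax, hmin]
          rw [ih (right - 4*p).toNat (by omega) (4*p) (k+1) _ rfl (by omega) (by omega)]
          rw [if_neg (by omega : ¬ (4*p ≤ left - 1)), if_pos (by omega : p ≤ left - 1), hfl, hfr]
          by_cases hle : left ≤ 4*p - 1
          · rw [if_pos hle]; ring
          · have hl4 : left = 4 * p := by omega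
            rw [if_neg hle, hl4]; ring
    · -- last iteration: p ≤ right < 4p
      push_neg at h4
      have hfr : fLoop right p k 0 = (right - p + 1) * k := by
        rw [fLoop_last right p k 0 (by omega : ¬ (0 < p ∧ 4*p ≤ right))]; ring
      have hmin : min right (4*p-1) = right := min_eq_left (by omega)
      rw [solveLoop_stop left right (4*p) (k+1) _ (by omega : ¬ (0 < 4*p ∧ 4*p ≤ right))]
      by_cases hL : left - 1 < p
      · have hmax : max left p = p := max_eq_right (by omega)
        rw [hmax, hmin, if_pos (by omega : p ≤ right)]
        rw [if_neg (by omega : ¬ (p ≤ left - 1)), hfr]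
        ring
      · push_neg at hL
        have hmax : max left p = left := max_eq_left (by omega)
        have hfl : fLoop (left-1) p k 0 = (left - 1 - p + 1) * k := by
          rw [fLoop_last (left-1) p k 0 (by omega : ¬ (0 < p ∧ 4*p ≤ left - 1))]; ring
        rw [hmax, hmin]
        rw [if_pos (by omega : p ≤ left - 1), hfl, hfr]
        by_cases hle : left ≤ right
        · rw [if_pos hle]; ring
        · rw [if_neg hle]
          have : left = right + 1 := by omega
          rw [this]; ring

-- ===== VERDICT (by name: the statement is the Claim_ definition above) =====
theorem solve_spec : Claim_equal_solve := by
  intro left right _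
  unfold Spec_solve solve solve_alt F_alt
  by_cases hlr : left > right
  · rw [solveLoop_empty left right (by omega) (right + 1 - 1).toNat 1 1 0 rfl, if_pos hlr]
  · push_neg at hlr
    rw [if_neg (by omega : ¬ left > right)]
    by_cases hr : right ≤ 0
    · rw [solveLoop_stop left right 1 1 0 (by omega : ¬ ((0:Int) < 1 ∧ 1 ≤ right)), if_pos hr,
          if_pos (by rcases max_cases left 1 with ⟨h1, _⟩ | ⟨h1, _⟩ <;> omega : max left 1 - 1 ≤ 0)]
      norm_num
    · push_neg at hr
      rw [solveLoop_eq_fLoop left right (by omega) (right - 1).toNat 1 1 0 rfl (by omega) (by omega)]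
      rw [if_neg (by omega : ¬ right ≤ 0)]
      by_cases hl1 : left ≤ 1
      · have e1 : max left 1 - 1 = 0 := by
          rcases max_cases left 1 with ⟨h1, _⟩ | ⟨h1, _⟩ <;> omega
        rw [if_neg (by omega : ¬ ((1:Int) ≤ left - 1)), e1,
            if_pos (by omega : (0:Int) ≤ 0)]
        ring
      · have e1 : max left 1 - 1 = left - 1 := by
          rcases max_cases left 1 with ⟨h1, _⟩ | ⟨h1, _⟩ <;> omega
        rw [if_pos (by omega : (1:Int) ≤ left - 1), e1,
            if_neg (by omega : ¬ (left - 1 ≤ 0))]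
        ring
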